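-- pv_equiv track=rewrite | github.com/yuichisugio/freeism | documentation/scripts/transform_society_merit_section.py | split_etc_top_level_bullets
-- ===== SOURCE A (Python) =====
-- def is_blank(line: str) -> bool:
--     return line.strip() == ""
--
-- def top_level_bullet_at_col0(line: str) -> bool:
--     return line.startswith("- ") and not line.startswith(" -")
--
-- def split_etc_top_level_bullets(body_lines: list[str]) -> list[tuple[str, list[str]]]:
--     chunks: list[tuple[str, list[str]]] = []
--     i = 0
--     while i < len(body_lines):
--         line = body_lines[i]
--         if is_blank(line):
--             i += 1
--             continue
--         if top_level_bullet_at_col0(line):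
--             title = line[2:].strip()
--             chunk: list[str] = []
--             i += 1
--             while i < len(body_lines):
--                 nxt = body_lines[i]
--                 if is_blank(nxt):
--                     chunk.append(nxt)
--                     i += 1
--                     continue
--                 if top_level_bullet_at_col0(nxt):
--                     break
--                 chunk.append(nxt)
--                 i += 1
--             while chunk and is_blank(chunk[-1]):
--                 chunk.pop()
--             chunks.append((title, chunk))
--             continue
--         i += 1
--     return chunks
-- ===== SOURCE B (Python) =====
-- def is_blank(line: str) -> bool:
--     return line.strip() == ""
--
-- def top_level_bullet_at_col0(line: str) -> bool:
--     return line.startswith("- ") and not line.startswith(" -")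
--
-- def split_etc_top_level_bullets(body_lines: list[str]) -> list[tuple[str, list[str]]]:
--     # One flat pass: blanks inside a chunk are buffered in `pending` and only
--     # committed when a later non-blank line arrives, so trailing blanks are
--     # never added and no post-hoc trimming is needed.
--     chunks: list[tuple[str, list[str]]] = []
--     title = None
--     chunk: list[str] = []
--     pending: list[str] = []
--     for line in body_lines:
--         if is_blank(line):
--             if title is not None:
--                 pending.append(line)
--         elif top_level_bullet_at_col0(line):
--             if title is not None:
--                 chunks.append((title, chunk))
--             title = line[2:].strip()
--             chunk = []
--             pending = []
--         elif title is not None: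
--             chunk.extend(pending)
--             chunk.append(line)
--             pending = []
--     if title is not None:
--         chunks.append((title, chunk))
--     return chunks
-- ===== Notes on version B (the rewrite author's own statement) =====
-- stated objective: simpler
-- what changed: Replaced A's nested index-based while-loops plus a trailing-blank pop loop by a single flat pass that buffers blank lines in a pending list and commits them only before a later non-blank line, so trailing blanks are never added and no trimming pass is needed. (single pass with no per-chunk index rescans or pop loop gives a constant-factor speedup)
import Mathlib
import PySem

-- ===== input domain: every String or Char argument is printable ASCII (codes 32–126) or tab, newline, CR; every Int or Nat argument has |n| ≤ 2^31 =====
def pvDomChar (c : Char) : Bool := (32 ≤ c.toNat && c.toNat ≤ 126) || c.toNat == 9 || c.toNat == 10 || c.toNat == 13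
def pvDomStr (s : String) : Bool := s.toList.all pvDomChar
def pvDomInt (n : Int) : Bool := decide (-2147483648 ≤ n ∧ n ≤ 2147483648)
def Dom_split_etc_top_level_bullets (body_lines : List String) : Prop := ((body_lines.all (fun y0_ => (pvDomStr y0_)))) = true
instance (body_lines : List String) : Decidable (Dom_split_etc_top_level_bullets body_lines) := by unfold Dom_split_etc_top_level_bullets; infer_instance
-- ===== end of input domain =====

-- B replaces A's nested index loops by ONE flat pass that buffers blank lines and
-- commits them only before a later non-blank line, so no trailing-blank trimming is needed.

-- ===== PORT A =====
-- is_blank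
def pvBlank (line : String) : Bool := PySem.Str.strip line == ""
-- top_level_bullet_at_col0
def pvBullet (line : String) : Bool :=
  PySem.Str.startswith line "- " && !(PySem.Str.startswith line " -")
-- line[2:].strip()
def pvTitle (line : String) : String := PySem.Str.strip (PySem.Str.slice line (some 2) none)

-- A's inner while loop: collects lines until a top-level bullet; returns (chunk, rest)
def pvInner : List String → List String × List String
  | [] => ([], [])
  | nxt :: rest =>
    if pvBlank nxt then
      let r := pvInner rest; (nxt :: r.1, r.2)
    else if pvBullet nxt then ([], nxt :: rest)
    else
      let r := pvInner rest; (nxt :: r.1, r.2)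

theorem pvInner_snd_le (l : List String) : (pvInner l).2.length ≤ l.length := by
  induction l with
  | nil => simp [pvInner]
  | cons x rest ih =>
    simp only [pvInner]
    split_ifs <;> simp <;> omega

-- A's trailing-blank pop loop: while chunk and is_blank(chunk[-1]): chunk.pop()
def pvPopTrail (l : List String) : List String :=
  match h : l.getLast? with
  | none => l
  | some x => if pvBlank x then pvPopTrail l.dropLast else l
termination_by l.length
decreasing_by
  have hne : l ≠ [] := by intro e; subst e; simp at h
  have : 0 < l.length := List.length_pos_iff.mpr hne
  simp [List.length_dropLast]; omega

def split_etc_top_level_bullets : List String → List (String × List String)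
  | [] => []
  | line :: rest =>
    if pvBlank line then split_etc_top_level_bullets rest
    else if pvBullet line then
      (pvTitle line, pvPopTrail (pvInner rest).1)
        :: split_etc_top_level_bullets (pvInner rest).2
    else split_etc_top_level_bullets rest
termination_by l => l.length
decreasing_by
  · simp
  · have := pvInner_snd_le rest; simp; omega
  · simp

-- ===== PORT B =====
-- state: (chunks, current title (none before first bullet), current chunk, pending blanks)
def pvStep (st : List (String × List String) × Option String × List String × List String)
    (line : String) : List (String × List String) × Option String × List String × List String :=
  match st with
  | (chunks, title?, chunk, pending) =>
    if pvBlank line then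
      match title? with
      | some t => (chunks, some t, chunk, pending ++ [line])
      | none => (chunks, none, chunk, pending)
    else if pvBullet line then
      ((match title? with | some t => chunks ++ [(t, chunk)] | none => chunks),
       some (pvTitle line), [], [])
    else
      match title? with
      | some t => (chunks, some t, chunk ++ pending ++ [line], [])
      | none => (chunks, none, chunk, pending)

-- the final flush
def pvFinish (st : List (String × List String) × Option String × List String × List String) :
    List (String × List String) :=
  match st with
  | (chunks, some t, chunk, _) => chunks ++ [(t, chunk)]
  | (chunks, none, _, _) => chunks

def split_etc_top_level_bullets_alt (body_lines : List String) : List (String × List String) :=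
  pvFinish (body_lines.foldl pvStep ([], none, [], []))

-- ===== PRECONDITION & SPEC =====
def Spec_split_etc_top_level_bullets (body_lines : List String) (out : List (String × List String)) : Prop := out = split_etc_top_level_bullets_alt body_lines
instance (body_lines : List String) (out : List (String × List String)) : Decidable (Spec_split_etc_top_level_bullets body_lines out) := by unfold Spec_split_etc_top_level_bullets; infer_instance

-- ===== CLAIM (what is proved, stated in full; the proofs are below) =====
def Claim_equal_split_etc_top_level_bullets : Prop := ∀ (body_lines : List String), Dom_split_etc_top_level_bullets body_lines → Spec_split_etc_top_level_bullets body_lines (split_etc_top_level_bullets body_lines)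

-- ===== LEMMAS AND PROOFS =====

theorem pvPopTrail_eq (l : List String) :
    pvPopTrail l = (l.reverse.dropWhile pvBlank).reverse := by
  induction l using pvPopTrail.induct with
  | case1 l h =>
    rw [List.getLast?_eq_none_iff] at h
    subst h; simp [pvPopTrail]
  | case2 l x h hb ih =>
    have hne : l ≠ [] := by intro e; subst e; simp at h
    have hl : l = l.dropLast ++ [x] := by
      have := List.dropLast_append_getLast hne
      rw [List.getLast?_eq_getLast_of_ne_nil hne] at h
      simp only [Option.some.injEq] at h
      rw [h] at this; exact this.symm
    rw [pvPopTrail, h]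
    simp only [hb, if_true]
    rw [ih]
    conv_rhs => rw [hl]
    simp [hb]
  | case3 l x h hb =>
    have hne : l ≠ [] := by intro e; subst e; simp at h
    have hl : l = l.dropLast ++ [x] := by
      have := List.dropLast_append_getLast hne
      rw [List.getLast?_eq_getLast_of_ne_nil hne] at h
      simp only [Option.some.injEq] at h
      rw [h] at this; exact this.symm
    rw [pvPopTrail, h]
    simp only [hb, if_false, Bool.false_eq_true]
    conv_rhs => rw [hl]
    simp [hb]
    exact hl

theorem pvPopTrail_all_blank (l : List String) (h : l.all pvBlank = true) :
    pvPopTrail l = [] := by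
  rw [pvPopTrail_eq]
  have : l.reverse.dropWhile pvBlank = [] := by
    rw [List.dropWhile_eq_nil_iff]
    intro x hx; exact List.all_eq_true.mp h x (List.mem_reverse.mp hx)
  simp [this]

theorem pvPopTrail_append (ys : List String) (x : String) (zs : List String)
    (hx : pvBlank x = false) :
    pvPopTrail (ys ++ x :: zs) = ys ++ x :: pvPopTrail zs := by
  rw [pvPopTrail_eq, pvPopTrail_eq]
  have : (ys ++ x :: zs).reverse = zs.reverse ++ x :: ys.reverse := by simp
  rw [this, List.dropWhile_append]
  by_cases hz : (zs.reverse.dropWhile pvBlank).isEmpty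
  · simp only [hz, if_true]
    rw [List.isEmpty_iff] at hz
    simp [hx, hz]
  · simp only [hz]
    simp

theorem pv_inChunk (l : List String) :
    ∀ (chunks : List (String × List String)) (t : String)
      (chunk pending : List String), pending.all pvBlank = true →
    pvFinish (l.foldl pvStep (chunks, some t, chunk, pending))
      = chunks ++ (t, chunk ++ pvPopTrail (pending ++ (pvInner l).1))
          :: split_etc_top_level_bullets (pvInner l).2 := by
  induction l with
  | nil =>
    intro chunks t chunk pending hp
    simp [pvInner, pvFinish, split_etc_top_level_bullets, pvPopTrail_all_blank pending hp]
  | cons x rest ih =>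
    intro chunks t chunk pending hp
    by_cases hb : pvBlank x = true
    · have hp' : (pending ++ [x]).all pvBlank = true := by simp [hp, hb]
      simp only [List.foldl_cons, pvStep, hb, if_true]
      rw [ih chunks t chunk (pending ++ [x]) hp']
      simp only [pvInner, hb, if_true]
      simp
    · by_cases hbl : pvBullet x = true
      · simp only [List.foldl_cons, pvStep, hb, if_false, hbl, if_true,
          Bool.false_eq_true]
        rw [ih (chunks ++ [(t, chunk)]) (pvTitle x) [] [] (by simp)]
        have hinner : pvInner (x :: rest) = ([], x :: rest) := by
          simp [pvInner, hb, hbl]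
        rw [hinner]
        rw [split_etc_top_level_bullets]
        simp [hb, hbl, pvPopTrail_all_blank pending hp]
      · simp only [List.foldl_cons, pvStep, hb, if_false, hbl, Bool.false_eq_true]
        rw [ih chunks t (chunk ++ pending ++ [x]) [] (by simp)]
        have hx : pvBlank x = false := by simpa using hb
        simp only [pvInner, hb, hbl, if_false, Bool.false_eq_true]
        rw [List.nil_append, pvPopTrail_append pending x (pvInner rest).1 hx]
        simp

theorem pv_pre (l : List String) :
    ∀ (chunks : List (String × List String)),
    pvFinish (l.foldl pvStep (chunks, none, [], []))
      = chunks ++ split_etc_top_level_bullets l := by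
  induction l with
  | nil => intro chunks; simp [pvFinish, split_etc_top_level_bullets]
  | cons x rest ih =>
    intro chunks
    by_cases hb : pvBlank x = true
    · simp only [List.foldl_cons, pvStep, hb, if_true]
      rw [ih chunks, split_etc_top_level_bullets]
      simp [hb]
    · by_cases hbl : pvBullet x = true
      · simp only [List.foldl_cons, pvStep, hb, hbl, if_true, if_false, Bool.false_eq_true]
        rw [pv_inChunk rest chunks (pvTitle x) [] [] (by simp)]
        rw [split_etc_top_level_bullets]
        simp [hb, hbl]
      · simp only [List.foldl_cons, pvStep, hb, hbl, if_false, Bool.false_eq_true]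
        rw [ih chunks, split_etc_top_level_bullets]
        simp [hb, hbl]

-- ===== VERDICT (by name: the statement is the Claim_ definition above) =====
theorem split_etc_top_level_bullets_spec : Claim_equal_split_etc_top_level_bullets := by
  intro body_lines _
  unfold Spec_split_etc_top_level_bullets split_etc_top_level_bullets_alt
  rw [pv_pre body_lines []]
  simp
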